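-- pv_equiv track=rewrite | github.com/IshaqAhmed02/AcademiaX | teacher_functions.py | generate_smart_timetable
-- ===== SOURCE A (Python) =====
-- from typing import List, Tuple, Dict
--
-- def generate_smart_timetable(
--     faculty_list: List[str],
--     time_slots: List[str],
--     subjects: List[str] = None,
--     constraints: Dict = None
-- ) -> List[Dict]:
--     """Generate intelligent timetable with constraints"""
--     if not faculty_list or not time_slots:
--         return []
--
--     subjects = subjects or []
--     constraints = constraints or {}
--
--     # Parse time slots to understand days and times
--     schedule = []
--     faculty_workload = {f: 0 for f in faculty_list}
--
--     for slot_idx, slot in enumerate(time_slots):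
--         # Try to parse day and time from slot
--         slot_parts = slot.strip().split()
--         day = slot_parts[0] if slot_parts else f"Day{slot_idx+1}"
--         time = " ".join(slot_parts[1:]) if len(slot_parts) > 1 else f"Period {slot_idx+1}"
--
--         # Select faculty with least workload
--         available_faculty = [f for f in faculty_list if faculty_workload[f] == min(faculty_workload.values())]
--         selected_faculty = available_faculty[slot_idx % len(available_faculty)]
--
--         # Select subject
--         selected_subject = subjects[slot_idx % len(subjects)] if subjects else f"Subject {slot_idx+1}"
--
--         # Apply constraints if any
--         if constraints.get("max_hours_per_faculty"):
--             if faculty_workload[selected_faculty] >= constraints["max_hours_per_faculty"]: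
--                 continue
--
--         entry = {
--             "Day": day,
--             "Time": time,
--             "Subject": selected_subject,
--             "Faculty": selected_faculty,
--             "Room": f"Room {(slot_idx % 10) + 1}"  # Simple room assignment
--         }
--
--         schedule.append(entry)
--         faculty_workload[selected_faculty] += 1
--
--     return schedule
-- ===== SOURCE B (Python) =====
-- def generate_smart_timetable(faculty_list, time_slots, subjects=None, constraints=None):
--     """Bucket-based rewrite: track the set of minimum-workload faculty and the
--     current minimum level incrementally instead of re-scanning the workload
--     dict for its minimum on every slot; a binding max-hours cap stops the loop."""
--     if not faculty_list or not time_slots: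
--         return []
--     subjects = subjects or []
--     cap = (constraints or {}).get("max_hours_per_faculty")
--     schedule = []
--     avail = list(faculty_list)   # faculty currently at the minimum workload, in list order
--     level = 0                    # the current minimum workload
--     for i, slot in enumerate(time_slots):
--         if cap and level >= cap:
--             break
--         parts = slot.strip().split()
--         day = parts[0] if parts else f"Day{i+1}"
--         time = " ".join(parts[1:]) if len(parts) > 1 else f"Period {i+1}"
--         fac = avail[i % len(avail)]
--         subj = subjects[i % len(subjects)] if subjects else f"Subject {i+1}"
--         schedule.append({"Day": day, "Time": time, "Subject": subj,
--                          "Faculty": fac, "Room": f"Room {(i % 10) + 1}"})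
--         avail = [g for g in avail if g != fac]
--         if not avail:           # everyone has reached level+1: new minimum bucket
--             avail = list(faculty_list)
--             level += 1
--     return schedule
-- ===== Notes on version B (the rewrite author's own statement) =====
-- stated objective: faster
-- what changed: B drops the workload dict entirely: instead of rescanning all faculty workloads for the minimum and re-filtering the full faculty list on every slot, it incrementally maintains the bucket of minimum-workload faculty (refilled from faculty_list when it empties) together with the current minimum level, and breaks out of the loop as soon as the max_hours_per_faculty cap binds.
import Mathlib
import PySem

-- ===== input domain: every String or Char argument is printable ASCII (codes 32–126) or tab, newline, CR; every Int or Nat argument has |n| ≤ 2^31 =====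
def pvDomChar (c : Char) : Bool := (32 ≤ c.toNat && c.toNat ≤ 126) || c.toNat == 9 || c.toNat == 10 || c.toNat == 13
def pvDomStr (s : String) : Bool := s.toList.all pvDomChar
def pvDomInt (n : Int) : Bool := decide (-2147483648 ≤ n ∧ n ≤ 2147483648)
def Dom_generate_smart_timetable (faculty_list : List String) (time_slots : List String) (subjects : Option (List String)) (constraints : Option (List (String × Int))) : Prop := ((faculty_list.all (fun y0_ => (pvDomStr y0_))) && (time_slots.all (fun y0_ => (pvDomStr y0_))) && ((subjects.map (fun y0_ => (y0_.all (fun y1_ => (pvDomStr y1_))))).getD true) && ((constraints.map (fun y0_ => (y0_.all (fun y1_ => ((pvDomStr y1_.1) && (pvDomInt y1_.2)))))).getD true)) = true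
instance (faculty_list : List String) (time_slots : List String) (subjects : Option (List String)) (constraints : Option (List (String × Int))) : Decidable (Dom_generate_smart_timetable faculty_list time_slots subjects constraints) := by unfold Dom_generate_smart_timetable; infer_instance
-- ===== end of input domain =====

-- B replaces A's per-slot rescan of the workload dict for its minimum by an incrementally
-- maintained minimum-workload bucket and stops as soon as the max-hours cap binds (objective: faster).

-- shared helpers: the slot-parsing and entry-building lines are identical in Source A and Source B
-- slot.strip().split(); slot_parts[1:] has nonnegative start, so it is List.drop 1 (exact)
def pvDay (slot : String) (i : Nat) : String :=
  match PySem.Str.split₀ (PySem.Str.strip slot) with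
  | [] => "Day" ++ PySem.Int.toStr ((i : Int) + 1)
  | p :: _ => p

def pvTime (slot : String) (i : Nat) : String :=
  let parts := PySem.Str.split₀ (PySem.Str.strip slot)
  if parts.length > 1 then PySem.Str.join " " (parts.drop 1)
  else "Period " ++ PySem.Int.toStr ((i : Int) + 1)

-- the entry dict literal {"Day": …, …}: five distinct keys, insertion order
def pvEntry (day time subj fac : String) (i : Nat) : List (String × String) :=
  [("Day", day), ("Time", time), ("Subject", subj), ("Faculty", fac),
   ("Room", "Room " ++ PySem.Int.toStr (((i % 10 : Nat) : Int) + 1))]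

-- subjects[i % len(subjects)] if subjects else f"Subject {i+1}"
def pvSubject (subjects : List String) (i : Nat) : String :=
  if subjects.isEmpty then "Subject " ++ PySem.Int.toStr ((i : Int) + 1)
  else (PySem.List.pyGet? subjects ((i % subjects.length : Nat) : Int)).getD ""

-- ===== PORT A =====
-- the for-loop of A: state = (slot index, schedule accumulator, workload dict);
-- cs is the constraints dict as an association list (lookup = first match)
def gstA_loop (faculty_list subjects : List String) (cs : List (String × Int)) :
    List String → Nat → List (List (String × String)) → PySem.Dict String Int →
      List (List (String × String))
  | [], _, acc, _ => acc
  | slot :: rest, i, acc, d =>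
      let day := pvDay slot i
      let time := pvTime slot i
      -- min(faculty_workload.values()); d.values is nonempty in every reachable state
      let minv := (PySem.List.min? d.values (fun v => v)).getD 0
      let available := faculty_list.filter (fun f => d.getD f 0 == minv)
      -- available_faculty[slot_idx % len(available_faculty)]; in range in every reachable state
      let selected := (PySem.List.pyGet? available ((i % available.length : Nat) : Int)).getD ""
      let subj := pvSubject subjects i
      -- if constraints.get("max_hours_per_faculty"):  (0 is falsy)
      let skip : Bool := match List.lookup "max_hours_per_faculty" cs with
        | some v => v != 0 && decide (d.getD selected 0 ≥ v)
        | none => false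
      if skip then gstA_loop faculty_list subjects cs rest (i + 1) acc d
      else gstA_loop faculty_list subjects cs rest (i + 1)
             (acc ++ [pvEntry day time subj selected i])
             (d.insert selected (d.getD selected 0 + 1))

def generate_smart_timetable (faculty_list : List String) (time_slots : List String) (subjects : Option (List String)) (constraints : Option (List (String × Int))) : List (List (String × String)) :=
  if faculty_list.isEmpty || time_slots.isEmpty then []
  else
    gstA_loop faculty_list (subjects.getD []) (constraints.getD []) time_slots 0 []
      (faculty_list.foldl (fun d f => d.insert f (0 : Int)) PySem.Dict.empty)

-- ===== PORT B =====
-- the for-loop of B: state = (slot index, min-workload bucket `avail`, min level, schedule);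
-- `break` on a binding cap returns the accumulator
def gstB_loop (faculty_list subjects : List String) (cap : Option Int) :
    List String → Nat → List String → Int → List (List (String × String)) →
      List (List (String × String))
  | [], _, _, _, acc => acc
  | slot :: rest, i, avail, level, acc =>
      -- if cap and level >= cap: break
      if (match cap with | some v => v != 0 && decide (level ≥ v) | none => false) then acc
      else
        let day := pvDay slot i
        let time := pvTime slot i
        let fac := (PySem.List.pyGet? avail ((i % avail.length : Nat) : Int)).getD ""
        let subj := pvSubject subjects i
        let acc' := acc ++ [pvEntry day time subj fac i]
        let avail' := avail.filter (fun g => !(g == fac))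
        if avail'.isEmpty then gstB_loop faculty_list subjects cap rest (i + 1) faculty_list (level + 1) acc'
        else gstB_loop faculty_list subjects cap rest (i + 1) avail' level acc'

def generate_smart_timetable_alt (faculty_list : List String) (time_slots : List String) (subjects : Option (List String)) (constraints : Option (List (String × Int))) : List (List (String × String)) :=
  if faculty_list.isEmpty || time_slots.isEmpty then []
  else
    gstB_loop faculty_list (subjects.getD [])
      (List.lookup "max_hours_per_faculty" (constraints.getD []))
      time_slots 0 faculty_list 0 []

-- ===== PRECONDITION & SPEC =====
def Spec_generate_smart_timetable (faculty_list : List String) (time_slots : List String) (subjects : Option (List String)) (constraints : Option (List (String × Int))) (out : List (List (String × String))) : Prop := out = generate_smart_timetable_alt faculty_list time_slots subjects constraints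
instance (faculty_list : List String) (time_slots : List String) (subjects : Option (List String)) (constraints : Option (List (String × Int))) (out : List (List (String × String))) : Decidable (Spec_generate_smart_timetable faculty_list time_slots subjects constraints out) := by unfold Spec_generate_smart_timetable; infer_instance

-- ===== CLAIM (what is proved, stated in full; the proofs are below) =====
def Claim_equal_generate_smart_timetable : Prop := ∀ (faculty_list : List String) (time_slots : List String) (subjects : Option (List String)) (constraints : Option (List (String × Int))), Dom_generate_smart_timetable faculty_list time_slots subjects constraints → Spec_generate_smart_timetable faculty_list time_slots subjects constraints (generate_smart_timetable faculty_list time_slots subjects constraints)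

-- ===== LEMMAS AND PROOFS =====

-- the initial dict {f: 0 for f in faculty_list}: every listed name maps to 0
theorem pv_getD_foldl_insert_zero (l : List String) (d : PySem.Dict String Int) (g : String) :
    (l.foldl (fun d f => d.insert f (0 : Int)) d).getD g 0 =
      if g ∈ l then 0 else d.getD g 0 := by
  induction l generalizing d with
  | nil => simp
  | cons a t ih =>
      simp only [List.foldl_cons, ih, List.mem_cons]
      by_cases hgt : g ∈ t
      · simp [hgt]
      · by_cases hga : g = a
        · simp [hga, PySem.Dict.getD_insert_self]
        · simp [hgt, hga, PySem.Dict.getD_insert]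

-- the element B selects lies in the current minimum bucket
theorem pv_sel_mem (avail : List String) (i : Nat) (hne : avail ≠ []) :
    (PySem.List.pyGet? avail ((i % avail.length : Nat) : Int)).getD "" ∈ avail := by
  rw [PySem.List.pyGet?_natCast]
  have hlt : i % avail.length < avail.length :=
    Nat.mod_lt _ (List.length_pos_iff.mpr hne)
  rw [List.getElem?_eq_getElem hlt]
  exact List.getElem_mem hlt

-- min(faculty_workload.values()) is the invariant level
theorem pv_min_values (faculty_list : List String) (d : PySem.Dict String Int) (level : Int)
    (hkeys : d.keys = PySem.Set.ofList faculty_list)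
    (hvals : ∀ g ∈ faculty_list, d.getD g 0 = level ∨ d.getD g 0 = level + 1)
    (hex : ∃ g ∈ faculty_list, d.getD g 0 = level) :
    (PySem.List.min? d.values (fun v => v)).getD 0 = level := by
  have hnd : d.keys.Nodup := by rw [hkeys]; exact PySem.Set.nodup_ofList _
  have hv : d.values = d.keys.map (fun k => d.getD k 0) :=
    PySem.Dict.values_eq_map_keys d hnd 0
  obtain ⟨g, hg, hgl⟩ := hex
  have hgk : g ∈ d.keys := by rw [hkeys, PySem.Set.mem_ofList]; exact hg
  have hlv : level ∈ d.values := by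
    rw [hv]; exact List.mem_map.mpr ⟨g, hgk, hgl⟩
  have hvne : d.values ≠ [] := List.ne_nil_of_mem hlv
  cases hm : PySem.List.min? d.values (fun v => v) with
  | none => exact absurd ((PySem.List.min?_eq_none_iff _ _).mp hm) hvne
  | some m =>
      have hmm : m ∈ d.values := PySem.List.min?_mem hm
      have hmle : m ≤ level := PySem.List.min?_isMin hm level hlv
      have hmge : level ≤ m := by
        rw [hv] at hmm
        obtain ⟨k, hk, hkm⟩ := List.mem_map.mp hmm
        have : k ∈ faculty_list := by
          rw [hkeys, PySem.Set.mem_ofList] at hk; exact hk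
        rcases hvals k this with h | h <;> omega
      have : m = level := le_antisymm hmle hmge
      simp [this]

-- once the cap binds, A's loop appends nothing more
theorem pv_skip_all (faculty_list subjects : List String) (cs : List (String × Int))
    (slots : List String) (i : Nat) (acc : List (List (String × String)))
    (d : PySem.Dict String Int) (level : Int)
    (hkeys : d.keys = PySem.Set.ofList faculty_list)
    (hvals : ∀ g ∈ faculty_list, d.getD g 0 = level ∨ d.getD g 0 = level + 1)
    (hex : ∃ g ∈ faculty_list, d.getD g 0 = level)
    (hskip : (match List.lookup "max_hours_per_faculty" cs with
      | some v => v != 0 && decide (level ≥ v) | none => false) = true) :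
    gstA_loop faculty_list subjects cs slots i acc d = acc := by
  induction slots generalizing i with
  | nil => rfl
  | cons slot rest ih =>
      have hmin := pv_min_values faculty_list d level hkeys hvals hex
      have hane : faculty_list.filter (fun g => d.getD g 0 == level) ≠ [] := by
        obtain ⟨g, hg, hgl⟩ := hex
        exact List.ne_nil_of_mem (List.mem_filter.mpr ⟨hg, by simp [hgl]⟩)
      have hselmem := pv_sel_mem _ i hane
      have hsel : d.getD ((PySem.List.pyGet? (faculty_list.filter (fun g => d.getD g 0 == level))
          ((i % (faculty_list.filter (fun g => d.getD g 0 == level)).length : Nat) : Int)).getD "") 0 = level := by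
        have := (List.mem_filter.mp hselmem).2
        simpa using this
      simp only [gstA_loop, hmin, hsel]
      rw [if_pos]
      · exact ih (i + 1)
      · revert hskip
        cases List.lookup "max_hours_per_faculty" cs <;> simp

-- the main invariant lemma: A's loop equals B's loop
theorem pv_loop_eq (faculty_list subjects : List String) (cs : List (String × Int))
    (slots : List String) (i : Nat) (acc : List (List (String × String)))
    (d : PySem.Dict String Int) (avail : List String) (level : Int)
    (hfl : faculty_list ≠ [])
    (hkeys : d.keys = PySem.Set.ofList faculty_list)
    (hvals : ∀ g ∈ faculty_list, d.getD g 0 = level ∨ d.getD g 0 = level + 1)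
    (havail : avail = faculty_list.filter (fun g => d.getD g 0 == level))
    (hne : avail ≠ []) :
    gstA_loop faculty_list subjects cs slots i acc d =
      gstB_loop faculty_list subjects
        (List.lookup "max_hours_per_faculty" cs) slots i avail level acc := by
  induction slots generalizing i acc d avail level with
  | nil => rfl
  | cons slot rest ih =>
      have hex : ∃ g ∈ faculty_list, d.getD g 0 = level := by
        obtain ⟨g, hg⟩ := List.exists_mem_of_ne_nil _ hne
        rw [havail] at hg
        obtain ⟨h1, h2⟩ := List.mem_filter.mp hg
        exact ⟨g, h1, by simpa using h2⟩
      have hmin := pv_min_values faculty_list d level hkeys hvals hex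
      have hselmem : (PySem.List.pyGet? avail ((i % avail.length : Nat) : Int)).getD "" ∈ avail :=
        pv_sel_mem avail i hne
      have hmemf : (PySem.List.pyGet? avail ((i % avail.length : Nat) : Int)).getD "" ∈
          faculty_list.filter (fun g => d.getD g 0 == level) := by
        rw [← havail]; exact hselmem
      have hsel : d.getD ((PySem.List.pyGet? avail ((i % avail.length : Nat) : Int)).getD "") 0 = level := by
        have := (List.mem_filter.mp hmemf).2
        simpa using this
      have hselfl : (PySem.List.pyGet? avail ((i % avail.length : Nat) : Int)).getD "" ∈ faculty_list :=
        (List.mem_filter.mp hmemf).1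
      simp only [gstA_loop]
      simp only [gstB_loop]
      rw [hmin, ← havail, hsel]
      set fac := (PySem.List.pyGet? avail ((i % avail.length : Nat) : Int)).getD "" with hfac
      by_cases hskip : (match List.lookup "max_hours_per_faculty" cs with
        | some v => v != 0 && decide (level ≥ v) | none => false) = true
      · rw [if_pos hskip, if_pos hskip]
        exact pv_skip_all faculty_list subjects cs rest (i + 1) acc d level hkeys hvals hex hskip
      · rw [if_neg hskip, if_neg hskip]
        -- the updated dict
        set d' := d.insert fac (level + 1) with hd'
        have hcont : d.contains fac = true :=
          (PySem.Dict.contains_iff_mem_keys d fac).mpr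
            (by rw [hkeys, PySem.Set.mem_ofList]; exact hselfl)
        have hkeys' : d'.keys = PySem.Set.ofList faculty_list := by
          rw [hd', PySem.Dict.keys_insert_of_contains d _ hcont]; exact hkeys
        have hgetD' : ∀ g, d'.getD g 0 = if g = fac then level + 1 else d.getD g 0 := by
          intro g
          rw [hd', PySem.Dict.getD_insert]
        have hfilter : faculty_list.filter (fun g => d'.getD g 0 == level) =
            avail.filter (fun g => !(g == fac)) := by
          rw [havail, List.filter_filter]
          apply List.filter_congr
          intro g _
          rw [hgetD' g]
          by_cases hgf : g = fac <;> simp [hgf]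
        by_cases hemp : (avail.filter (fun g => !(g == fac))).isEmpty = true
        · rw [if_pos hemp]
          have hempn : avail.filter (fun g => !(g == fac)) = [] :=
            List.isEmpty_iff.mp hemp
          have hall : ∀ g ∈ faculty_list, d'.getD g 0 = level + 1 := by
            intro g hg
            rw [hgetD' g]
            by_cases hgf : g = fac
            · simp [hgf]
            · rw [if_neg hgf]
              rcases hvals g hg with h | h
              · exfalso
                have : g ∈ avail.filter (fun g => !(g == fac)) := by
                  rw [havail, List.filter_filter]
                  exact List.mem_filter.mpr ⟨hg, by simp [h, hgf]⟩
                rw [hempn] at this; exact absurd this (List.not_mem_nil)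
              · exact h
          exact ih (i + 1) _ d' faculty_list (level + 1) hkeys'
            (fun g hg => Or.inl (hall g hg))
            (by symm; exact List.filter_eq_self.mpr (fun g hg => by simp [hall g hg]))
            hfl
        · rw [if_neg hemp]
          refine ih (i + 1) _ d' (avail.filter (fun g => !(g == fac))) level hkeys' ?_ hfilter.symm
            (fun h => hemp (by rw [h]; rfl))
          intro g hg
          rw [hgetD' g]
          by_cases hgf : g = fac
          · simp [hgf]
          · rw [if_neg hgf]; exact hvals g hg

-- ===== VERDICT (by name: the statement is the Claim_ definition above) =====
theorem generate_smart_timetable_spec : Claim_equal_generate_smart_timetable := by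
  intro fl ts sj cs _
  unfold Spec_generate_smart_timetable generate_smart_timetable generate_smart_timetable_alt
  by_cases h : fl.isEmpty || ts.isEmpty
  · simp [h]
  · simp only [h]
    have hfl : fl ≠ [] := by
      intro hnil; subst hnil; simp at h
    refine pv_loop_eq fl (sj.getD []) (cs.getD []) ts 0 [] _ fl 0 hfl ?_ ?_ ?_ ?_
    · rw [PySem.Dict.keys_foldl_insert]
      simp [PySem.Dict.keys_empty]
      rfl
    · intro g hg; left; rw [pv_getD_foldl_insert_zero]; simp [hg]
    · symm
      refine List.filter_eq_self.mpr ?_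
      intro g hg; rw [pv_getD_foldl_insert_zero]; simp [hg]
    · exact hfl
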